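-- pv_equiv track=rewrite | github.com/CTStudyGroup/BOJ | _eunjin/14698_전생했더니_슬라임_연구자였던_건에_대하여.py | solve
-- ===== SOURCE A (Python) =====
-- import heapq
--
-- def solve(slime):
--     answer = 1
--     heapq.heapify(slime)  # 우선순위큐로 변환
--
--     while len(slime) > 1:
--         a = heapq.heappop(slime)
--         b = heapq.heappop(slime)
--         answer *= a * b
--         heapq.heappush(slime, a * b)
--
--     return answer
-- ===== SOURCE B (Python) =====
-- def solve(slime):
--     # Keeps a sorted working list instead of a heap: sort once, take the two
--     # smallest from the front, insert the product back at its sorted position.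
--     order = sorted(slime)
--     answer = 1
--     while len(order) > 1:
--         a, b = order[0], order[1]
--         p = a * b
--         answer *= p
--         rest = order[2:]
--         i = 0
--         while i < len(rest) and rest[i] < p:
--             i += 1
--         rest.insert(i, p)
--         order = rest
--     slime[:] = order  # leave slime holding the final contents, as A does
--     return answer
-- ===== Notes on version B (the rewrite author's own statement) =====
-- stated objective: simpler
-- what changed: Replaces the heap with a once-sorted list: each round takes the two smallest from the front and re-inserts their product at its sorted position by a linear scan, instead of heapify/heappop/heappush.
import Mathlib
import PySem

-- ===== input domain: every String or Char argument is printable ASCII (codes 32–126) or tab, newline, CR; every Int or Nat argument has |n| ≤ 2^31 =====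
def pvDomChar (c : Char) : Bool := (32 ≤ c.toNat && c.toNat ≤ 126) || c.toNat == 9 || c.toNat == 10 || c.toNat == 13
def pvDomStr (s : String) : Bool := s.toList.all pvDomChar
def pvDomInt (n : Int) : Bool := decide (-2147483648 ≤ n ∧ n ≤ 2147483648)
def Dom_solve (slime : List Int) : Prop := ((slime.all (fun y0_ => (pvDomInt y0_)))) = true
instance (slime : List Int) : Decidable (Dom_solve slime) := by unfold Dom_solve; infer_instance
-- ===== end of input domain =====

-- B replaces the heap by a once-sorted list with linear re-insertion of each product
-- (objective: simpler). Both Pythons mutate `slime`; the equivalence proved here is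
-- about the RETURN value only (their final list contents coincide as multisets anyway).

-- ===== PORT A =====
-- heapq.heappop is ported by its contract: it returns the minimum element of the
-- heap and removes one occurrence of it (the `.erase`); the `none` branch is the
-- IndexError on an empty heap, unreachable under the `1 < len` guard.
def popMinA (l : List Int) : Int × List Int :=
  match PySem.List.min? l (fun x => x) with
  | some m => (m, l.erase m)
  | none => (0, [])

theorem popMinA_len (l : List Int) (h : l ≠ []) : (popMinA l).2.length = l.length - 1 := by
  unfold popMinA
  cases hm : PySem.List.min? l (fun x => x) with
  | none => exact absurd ((PySem.List.min?_eq_none_iff _ _).mp hm) h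
  | some m =>
    simp only
    exact List.length_erase_of_mem (PySem.List.min?_mem hm)

def solveLoop (l : List Int) (answer : Int) : Int :=
  if h : 1 < l.length then
    let a := (popMinA l).1
    let l1 := (popMinA l).2
    let b := (popMinA l1).1
    let l2 := (popMinA l1).2
    solveLoop (l2 ++ [a * b]) (answer * (a * b))
  else answer
termination_by l.length
decreasing_by
  have h1 : (popMinA l).2.length = l.length - 1 :=
    popMinA_len l (by intro hnil; simp [hnil] at h)
  have h2 : (popMinA (popMinA l).2).2.length = (popMinA l).2.length - 1 :=
    popMinA_len _ (by intro hnil; rw [hnil] at h1; simp at h1; omega)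
  simp only [List.length_append, List.length_cons, List.length_nil]
  omega

def solve (slime : List Int) : Int := solveLoop slime 1

-- ===== PORT B =====
-- the inner `while i < len(rest) and rest[i] < p` insertion scan
def insertLin (p : Int) : List Int → List Int
  | [] => [p]
  | x :: xs => if x < p then x :: insertLin p xs else p :: x :: xs

theorem insertLin_len (p : Int) (l : List Int) : (insertLin p l).length = l.length + 1 := by
  induction l with
  | nil => rfl
  | cons x xs ih => simp only [insertLin]; split <;> simp [ih]

def altLoop (l : List Int) (answer : Int) : Int :=
  match l with
  | a :: b :: rest => altLoop (insertLin (a * b) rest) (answer * (a * b))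
  | _ => answer
termination_by l.length
decreasing_by simp [insertLin_len]

def solve_alt (slime : List Int) : Int :=
  altLoop (PySem.List.sorted slime (fun x => x) false) 1

-- ===== PRECONDITION & SPEC =====
def Spec_solve (slime : List Int) (out : Int) : Prop := out = solve_alt slime
instance (slime : List Int) (out : Int) : Decidable (Spec_solve slime out) := by unfold Spec_solve; infer_instance

-- ===== CLAIM (what is proved, stated in full; the proofs are below) =====
def Claim_equal_solve : Prop := ∀ (slime : List Int), Dom_solve slime → Spec_solve slime (solve slime)

-- ===== LEMMAS AND PROOFS =====

theorem min?_of_perm_sorted (l : List Int) (a : Int) (t : List Int)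
    (hp : l.Perm (a :: t)) (hs : (a :: t).Pairwise (· ≤ ·)) :
    PySem.List.min? l (fun x => x) = some a := by
  cases hm : PySem.List.min? l (fun x => x) with
  | none =>
    have : l = [] := (PySem.List.min?_eq_none_iff _ _).mp hm
    subst this
    exact absurd hp.length_eq (by simp)
  | some m =>
    have hmem : m ∈ l := PySem.List.min?_mem hm
    have hmin : ∀ y ∈ l, m ≤ y := fun y hy => PySem.List.min?_isMin hm y hy
    have ha : a ∈ l := hp.mem_iff.mpr (by simp)
    have hms : m ∈ a :: t := hp.subset hmem
    have ham : a ≤ m := by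
      rcases List.mem_cons.mp hms with h | h
      · omega
      · exact (List.pairwise_cons.mp hs).1 m h
    have : m = a := le_antisymm (hmin a ha) ham
    rw [this]

theorem insertLin_perm (p : Int) (l : List Int) : (insertLin p l).Perm (p :: l) := by
  induction l with
  | nil => rfl
  | cons x xs ih =>
    simp only [insertLin]
    split
    · exact (ih.cons x).trans (List.Perm.swap p x xs)
    · rfl

theorem insertLin_pairwise (p : Int) (l : List Int) (h : l.Pairwise (· ≤ ·)) :
    (insertLin p l).Pairwise (· ≤ ·) := by
  induction l with
  | nil => simp [insertLin]
  | cons x xs ih =>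
    rcases List.pairwise_cons.mp h with ⟨hx, hxs⟩
    simp only [insertLin]
    split
    · rename_i hlt
      refine List.pairwise_cons.mpr ⟨?_, ih hxs⟩
      intro y hy
      rcases List.mem_cons.mp ((insertLin_perm p xs).mem_iff.mp hy) with h' | h'
      · subst h'; omega
      · exact hx y h'
    · rename_i hnlt
      refine List.pairwise_cons.mpr ⟨?_, h⟩
      intro y hy
      rcases List.mem_cons.mp hy with h' | h'
      · omega
      · exact le_trans (by omega) (hx y h')

theorem loop_eq (n : Nat) : ∀ (l s : List Int) (answer : Int), l.length ≤ n →
    l.Perm s → s.Pairwise (· ≤ ·) → solveLoop l answer = altLoop s answer := by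
  induction n with
  | zero =>
    intro l s answer hn hp _
    have hl : l = [] := List.eq_nil_of_length_eq_zero (Nat.le_zero.mp hn)
    subst hl
    have hs : s = [] := hp.symm.eq_nil
    subst hs
    rw [solveLoop, altLoop]
    · simp
    · intro a b rest h; cases h
  | succ n ih =>
    intro l s answer hn hp hs
    match s with
    | [] =>
      have hl : l = [] := hp.eq_nil
      subst hl
      rw [solveLoop, altLoop]
      · simp
      · intro a b rest h; cases h
    | [x] =>
      have hl : l.length = 1 := by simpa using hp.length_eq
      rw [solveLoop, altLoop]
      · simp [hl]
      · intro a b rest h; cases h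
    | a :: b :: rest =>
      have hlen : l.length = rest.length + 2 := by simpa using hp.length_eq
      have hgt : 1 < l.length := by omega
      -- first pop
      have hmin1 : PySem.List.min? l (fun x => x) = some a :=
        min?_of_perm_sorted l a (b :: rest) hp hs
      have hpop1 : popMinA l = (a, l.erase a) := by
        unfold popMinA; rw [hmin1]
      have hperm1 : (l.erase a).Perm (b :: rest) := by
        have := hp.erase a
        simpa using this
      have hs2 : (b :: rest).Pairwise (· ≤ ·) := (List.pairwise_cons.mp hs).2
      have hmin2 : PySem.List.min? (l.erase a) (fun x => x) = some b :=
        min?_of_perm_sorted (l.erase a) b rest hperm1 hs2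
      have hpop2 : popMinA (l.erase a) = (b, (l.erase a).erase b) := by
        unfold popMinA; rw [hmin2]
      have hperm2 : ((l.erase a).erase b).Perm rest := by
        have := hperm1.erase b
        simpa using this
      rw [solveLoop]
      simp only [hgt, dif_pos, hpop1, hpop2]
      rw [altLoop]
      refine ih _ _ _ ?_ ?_ ?_
      · have : ((l.erase a).erase b).length = rest.length := hperm2.length_eq
        simp only [List.length_append, List.length_cons, List.length_nil, this]
        omega
      · refine List.Perm.trans (List.perm_append_singleton _ _) ?_
        exact List.Perm.trans (hperm2.cons (a * b)) (insertLin_perm (a * b) rest).symm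
      · exact insertLin_pairwise _ _ (List.pairwise_cons.mp hs2).2

-- ===== VERDICT (by name: the statement is the Claim_ definition above) =====
theorem solve_spec : Claim_equal_solve := by
  intro slime _
  unfold Spec_solve solve solve_alt
  exact loop_eq slime.length slime _ 1 le_rfl
    (PySem.List.sorted_perm slime (fun x => x) false).symm
    (by simpa using PySem.List.sorted_pairwise slime (fun x => x))
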